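-- pv_equiv track=rewrite | github.com/GOSC-CNIC/zhongkun | scripts/workers/server_notifier.py | html_minify
-- ===== SOURCE A (Python) =====
-- def html_minify(_html: str):
--     """
--     去除html空行或每行前面的空格
--     """
--     lines = _html.split('\n')
--     new_lines = []
--     for line in lines:
--         line = line.lstrip(' ')
--         if line:
--             new_lines.append(line)
--
--     return '\n'.join(new_lines)
-- ===== SOURCE B (Python) =====
-- def html_minify(_html: str):
--     """
--     One-pass character state machine: skip leading spaces of each line,
--     emit a single '\n' separator before each further non-blank line.
--     """
--     out = []
--     in_line = False  # True once the current line has emitted content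
--     for c in _html:
--         if c == '\n':
--             in_line = False
--         elif not in_line and c == ' ':
--             pass  # leading space of a line: dropped
--         else:
--             if not in_line and out:
--                 out.append('\n')
--             out.append(c)
--             in_line = True
--     return ''.join(out)
-- ===== Notes on version B (the rewrite author's own statement) =====
-- stated objective: alternative
-- what changed: Replaced the split-into-lines + per-line lstrip/filter + join pipeline with a single character-by-character state machine that drops each line's leading spaces and blank lines and inserts newline separators on the fly, building no line list.
import Mathlib
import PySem

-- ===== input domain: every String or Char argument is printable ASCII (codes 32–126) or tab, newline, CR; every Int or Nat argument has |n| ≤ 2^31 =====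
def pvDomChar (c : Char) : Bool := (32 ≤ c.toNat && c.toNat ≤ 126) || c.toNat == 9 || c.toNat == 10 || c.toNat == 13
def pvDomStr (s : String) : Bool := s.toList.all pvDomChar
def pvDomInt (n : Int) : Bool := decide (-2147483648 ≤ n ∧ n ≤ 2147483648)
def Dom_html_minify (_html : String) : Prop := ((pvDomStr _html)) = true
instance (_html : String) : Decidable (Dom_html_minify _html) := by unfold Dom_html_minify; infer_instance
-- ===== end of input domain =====

-- B replaces split/lstrip-loop/join by a one-pass character state machine (alternative decomposition, same O(n) cost).


-- ===== PORT A =====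
-- lines = _html.split('\n'); for line in lines: line = line.lstrip(' ') (exact: drops leading ' ' only,
-- ported as dropWhile (· == ' ')); if line: new_lines.append(line); return '\n'.join(new_lines)
def html_minify (_html : String) : String :=
  let lines := PySem.Chars.splitOn _html.toList ['\n']
  let newLines := lines.foldl (fun acc line =>
      if !(line.dropWhile (· == ' ')).isEmpty then acc ++ [line.dropWhile (· == ' ')] else acc) []
  String.ofList (PySem.Chars.join ['\n'] newLines)

-- ===== PORT B =====
def altGo : List Char → List Char → Bool → List Char
  | [], out, _ => out
  | c :: rest, out, inLine =>
    if c == '\n' then altGo rest out false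
    else if !inLine && c == ' ' then altGo rest out inLine
    else altGo rest (out ++ (if !inLine && !out.isEmpty then ['\n'] else []) ++ [c]) true

def html_minify_alt (_html : String) : String :=
  String.ofList (altGo _html.toList [] false)

-- ===== PRECONDITION & SPEC =====
def Spec_html_minify (_html : String) (out : String) : Prop := out = html_minify_alt _html
instance (_html : String) (out : String) : Decidable (Spec_html_minify _html out) := by unfold Spec_html_minify; infer_instance

-- ===== CLAIM (what is proved, stated in full; the proofs are below) =====
def Claim_equal_html_minify : Prop := ∀ (_html : String), Dom_html_minify _html → Spec_html_minify _html (html_minify _html)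

-- ===== LEMMAS AND PROOFS =====

-- proof-side mirror of PySem.Chars.splitOn.go for sep = ['\n'] (no fuel, no reversed accumulator)
def split' : List Char → List Char → List (List Char)
  | [], cur => [cur.reverse]
  | c :: r, cur => if c == '\n' then cur.reverse :: split' r [] else split' r (c :: cur)

-- accumulator-free mirror of altGo: state (inLine, started = "output so far nonempty")
def tf : List Char → Bool → Bool → List Char
  | [], _, _ => []
  | c :: r, inLine, started =>
    if c == '\n' then tf r false started
    else if !inLine && c == ' ' then tf r inLine started
    else (if !inLine && started then ['\n'] else []) ++ c :: tf r true true

-- the stripped nonempty lines, as the foldl of port A produces them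
def flt (ls : List (List Char)) : List (List Char) :=
  (ls.filter (fun line => !(line.dropWhile (· == ' ')).isEmpty)).map (fun line => line.dropWhile (· == ' '))

theorem go_eq_split' (l : List Char) : ∀ (fuel : Nat), l.length < fuel →
    ∀ (cur : List Char) (acc : List (List Char)),
    PySem.Chars.splitOn.go ['\n'] fuel l cur acc = acc.reverse ++ split' l cur := by
  induction l with
  | nil =>
    intro fuel hf cur acc
    match fuel, hf with
    | fuel + 1, _ => simp [PySem.Chars.splitOn.go, split']
  | cons c r ih =>
    intro fuel hf cur acc
    match fuel, hf with
    | fuel + 1, hf =>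
      by_cases hc : c = '\n'
      · subst hc
        have hpre : List.isPrefixOf ['\n'] ('\n' :: r) = true := by
          simp [List.isPrefixOf]
        simp only [PySem.Chars.splitOn.go, hpre, if_true]
        rw [show List.drop ['\n'].length ('\n' :: r) = r from rfl,
          ih fuel (by simpa using hf) [] (cur.reverse :: acc)]
        simp [split']
      · have hpre : List.isPrefixOf ['\n'] (c :: r) = false := by
          simp [List.isPrefixOf]
          intro h; exact absurd h.symm hc
        simp only [PySem.Chars.splitOn.go, hpre, Bool.false_eq_true, if_false]
        rw [ih fuel (by simpa using hf) (c :: cur) acc]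
        have hcb : (c == '\n') = false := by simp [hc]
        simp [split', hcb]

theorem splitOn_eq_split' (l : List Char) :
    PySem.Chars.splitOn l ['\n'] = split' l [] := by
  rw [PySem.Chars.splitOn, go_eq_split' l (l.length + 1) (by omega) [] []]
  simp

-- split' l cur is split' l [] with cur.reverse glued onto the head line
theorem split'_decomp (l : List Char) : ∀ cur : List Char,
    ∃ h t, split' l [] = h :: t ∧ split' l cur = (cur.reverse ++ h) :: t := by
  induction l with
  | nil => intro cur; exact ⟨[], [], by simp [split'], by simp [split']⟩
  | cons c r ih =>
    intro cur
    by_cases hc : c = '\n'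
    · subst hc
      exact ⟨[], split' r [], by simp [split'], by simp [split']⟩
    · have hcb : (c == '\n') = false := by simp [hc]
      obtain ⟨h, t, e0, ec⟩ := ih [c]
      obtain ⟨h2, t2, e02, ec2⟩ := ih (c :: cur)
      rw [e0] at e02
      injection e02 with eh et
      subst eh; subst et
      refine ⟨c :: h, t, ?_, ?_⟩
      · simp only [split', hcb, Bool.false_eq_true, if_false]
        rw [ec]; simp
      · simp only [split', hcb, Bool.false_eq_true, if_false]
        rw [ec2]; simp

theorem join_cons (x : List Char) (xs : List (List Char)) :
    PySem.Chars.join ['\n'] (x :: xs) = x ++ xs.flatMap (fun y => '\n' :: y) := by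
  induction xs generalizing x with
  | nil => simp [PySem.Chars.join, List.intercalate]
  | cons y ys ih =>
    have hy := ih y
    simp only [PySem.Chars.join, List.intercalate] at hy ⊢
    rw [List.intersperse_cons₂, List.flatten_cons, List.flatten_cons, hy]
    simp

theorem main_tf (l : List Char) :
    (PySem.Chars.join ['\n'] (flt (split' l [])) = tf l false false)
    ∧ ((flt (split' l [])).flatMap (fun y => '\n' :: y) = tf l false true)
    ∧ (∀ h t, split' l [] = h :: t →
        h ++ (flt t).flatMap (fun y => '\n' :: y) = tf l true true) := by
  induction l with
  | nil =>
    refine ⟨by simp [split', flt, tf, PySem.Chars.join, List.intercalate], by simp [split', flt, tf], ?_⟩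
    intro h t e
    simp [split'] at e
    obtain ⟨rfl, rfl⟩ := e
    simp [flt, tf]
  | cons c r ih =>
    obtain ⟨ih1, ih2, ih3⟩ := ih
    by_cases hc : c = '\n'
    · subst hc
      have hl : split' ('\n' :: r) [] = [] :: split' r [] := by simp [split']
      have hf : flt ([] :: split' r []) = flt (split' r []) := by simp [flt]
      refine ⟨?_, ?_, ?_⟩
      · rw [hl, hf, ih1]; simp [tf]
      · rw [hl, hf, ih2]; simp [tf]
      · intro h t e
        rw [hl] at e
        injection e with eh et
        subst eh; subst et
        simpa [tf] using ih2
    · have hcb : (c == '\n') = false := by simp [hc]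
      obtain ⟨h, t, e0, ec⟩ := split'_decomp r [c]
      have hl : split' (c :: r) [] = (c :: h) :: t := by
        simp only [split', hcb, Bool.false_eq_true, if_false]
        rw [ec]; simp
      have hK : h ++ (flt t).flatMap (fun y => '\n' :: y) = tf r true true := ih3 h t e0
      by_cases hs : c = ' '
      · subst hs
        have hcb' : (' ' == '\n') = false := by decide
        have hstrip : ((' ' :: h).dropWhile (· == ' ')) = h.dropWhile (· == ' ') := by
          simp [List.dropWhile]
        have hf : flt ((' ' :: h) :: t) = flt (split' r []) := by
          rw [e0]
          simp only [flt, List.filter_cons, hstrip]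
          split_ifs with hcond
          · simp [hstrip]
          · rfl
        have t1 : tf (' ' :: r) false false = tf r false false := by simp [tf]
        have t2 : tf (' ' :: r) false true = tf r false true := by simp [tf]
        have t3 : tf (' ' :: r) true true = ' ' :: tf r true true := by simp [tf]
        refine ⟨?_, ?_, ?_⟩
        · rw [hl, hf, ih1, t1]
        · rw [hl, hf, ih2, t2]
        · intro h' t' e
          rw [hl] at e
          injection e with eh et
          subst eh; subst et
          rw [t3, ← hK]
          simp
      · have hsb : (c == ' ') = false := by simp [hs]
        have hstrip : ((c :: h).dropWhile (· == ' ')) = c :: h := by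
          simp [List.dropWhile, hsb]
        have hf : flt ((c :: h) :: t) = (c :: h) :: flt t := by
          simp [flt, hstrip]
        have t1 : tf (c :: r) false false = c :: tf r true true := by simp [tf, hcb, hsb]
        have t2 : tf (c :: r) false true = '\n' :: c :: tf r true true := by simp [tf, hcb, hsb]
        have t3 : tf (c :: r) true true = c :: tf r true true := by simp [tf, hcb, hsb]
        refine ⟨?_, ?_, ?_⟩
        · rw [hl, hf, join_cons, t1, ← hK]
          simp
        · rw [hl, hf, List.flatMap_cons, t2, ← hK]
          simp
        · intro h' t' e
          rw [hl] at e
          injection e with eh et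
          subst eh; subst et
          rw [t3, ← hK]
          simp
theorem altGo_eq_tf (l : List Char) : ∀ (out : List Char) (inLine : Bool),
    altGo l out inLine = out ++ tf l inLine (!out.isEmpty) := by
  induction l with
  | nil => intro out inLine; simp [altGo, tf]
  | cons c r ih =>
    intro out inLine
    by_cases hc : (c == '\n') = true
    · simp only [altGo, tf, hc, if_true]
      rw [ih]
    · by_cases hsk : (!inLine && c == ' ') = true
      · simp only [altGo, tf, hc, Bool.false_eq_true, if_false, hsk, if_true]
        rw [ih]
      · simp only [altGo, tf, hc, hsk, Bool.false_eq_true, if_false]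
        rw [ih]
        have hne : (!(out ++ (if (!inLine && !out.isEmpty) = true then ['\n'] else []) ++ [c]).isEmpty) = true := by
          simp
        rw [hne]
        simp

-- ===== VERDICT (by name: the statement is the Claim_ definition above) =====
theorem html_minify_spec : Claim_equal_html_minify := by
  intro s _
  unfold Spec_html_minify
  simp only [html_minify, html_minify_alt]
  rw [splitOn_eq_split', PySem.List.foldl_append_if
    (fun line => !(List.dropWhile (fun x => x == ' ') line).isEmpty)
    (fun line => List.dropWhile (fun x => x == ' ') line)]
  rw [altGo_eq_tf]
  have h1 := (main_tf s.toList).1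
  simp only [List.nil_append, List.isEmpty_nil, Bool.not_true]
  rw [← h1]
  rfl
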